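-- pv_equiv track=rewrite | github.com/BobTheFarmer/TACS-PokerBots-2026 | bot_aggro_pressure/player.py | _fill_unknowns
-- ===== SOURCE A (Python) =====
-- def _fill_unknowns(cards, draws):
--     filled = list(cards)
--     draw_index = 0
--     for idx, card in enumerate(filled):
--         if card == '??':
--             filled[idx] = draws[draw_index]
--             draw_index += 1
--     return filled, draw_index
-- ===== SOURCE B (Python) =====
-- def _fill_unknowns(cards, draws):
--     positions = [i for i, c in enumerate(cards) if c == '??']
--     filled = list(cards)
--     for j in range(len(positions)):
--         filled[positions[j]] = draws[j]
--     return filled, len(positions)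
-- ===== Notes on version B (the rewrite author's own statement) =====
-- stated objective: alternative
-- what changed: Replaced the single pass with a running draw counter by a two-pass decomposition: first build the index list of '??' positions, then assign draws positionally and return the position count.
import Mathlib
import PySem

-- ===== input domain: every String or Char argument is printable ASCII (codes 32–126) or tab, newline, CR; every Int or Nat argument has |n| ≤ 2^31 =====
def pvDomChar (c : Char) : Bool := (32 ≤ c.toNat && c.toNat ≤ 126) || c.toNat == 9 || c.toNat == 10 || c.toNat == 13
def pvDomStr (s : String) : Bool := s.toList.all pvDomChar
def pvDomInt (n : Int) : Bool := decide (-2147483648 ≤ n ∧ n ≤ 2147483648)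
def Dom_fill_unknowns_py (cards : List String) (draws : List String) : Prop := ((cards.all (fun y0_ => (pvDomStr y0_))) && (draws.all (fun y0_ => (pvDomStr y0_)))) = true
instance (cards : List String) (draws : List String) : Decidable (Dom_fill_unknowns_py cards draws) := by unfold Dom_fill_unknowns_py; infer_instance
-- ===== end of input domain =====

-- B decomposes A's single counter-carrying pass into index-gathering then positional assignment (objective: alternative).

-- ===== PORT A =====
-- the for-loop over enumerate(filled) as structural recursion; draw_index is the carried counter
def pvFillGoA : List String → List String → Nat → List String × Nat
  | [], _, n => ([], n)
  | c :: cs, ds, n =>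
    if c == "??" then
      let r := pvFillGoA cs ds (n + 1)
      ((PySem.List.pyGetD ds (n : Int) "") :: r.1, r.2)   -- draws[draw_index]; out-of-range excluded by Pre_
    else
      let r := pvFillGoA cs ds n
      (c :: r.1, r.2)

def fill_unknowns_py (cards : List String) (draws : List String) : List String × Int :=
  let r := pvFillGoA cards draws 0
  (r.1, (r.2 : Int))

-- ===== PORT B =====
def fill_unknowns_py_alt (cards : List String) (draws : List String) : List String × Int :=
  let positions : List Int :=
    ((PySem.List.enumerate cards 0).filter (fun p => p.2 == "??")).map (fun p => p.1)
  let filled : List String :=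
    (PySem.List.pyRange 0 (positions.length : Int) 1).foldl
      (fun f j => PySem.List.pySetD f (PySem.List.pyGetD positions j 0) (PySem.List.pyGetD draws j ""))
      cards
  (filled, (positions.length : Int))

-- ===== PRECONDITION & SPEC =====
-- Pre_ excludes exactly the inputs with more '??' cards than draws, where Python A raises IndexError (B raises there too).
def Pre_fill_unknowns_py (cards : List String) (draws : List String) : Prop :=
  cards.count "??" ≤ draws.length

instance (cards : List String) (draws : List String) : Decidable (Pre_fill_unknowns_py cards draws) := by
  unfold Pre_fill_unknowns_py; infer_instance

def pvWitness_fill_unknowns_py : List String × List String := (["??", "Ah", "??"], ["Kd", "Qs"])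

def Spec_fill_unknowns_py (cards : List String) (draws : List String) (out : List String × Int) : Prop := out = fill_unknowns_py_alt cards draws
instance (cards : List String) (draws : List String) (out : List String × Int) : Decidable (Spec_fill_unknowns_py cards draws out) := by unfold Spec_fill_unknowns_py; infer_instance

-- ===== CLAIM (what is proved, stated in full; the proofs are below) =====
def Claim_equal_fill_unknowns_py : Prop := ∀ (cards : List String) (draws : List String), Dom_fill_unknowns_py cards draws → Pre_fill_unknowns_py cards draws → Spec_fill_unknowns_py cards draws (fill_unknowns_py cards draws)

-- ===== LEMMAS AND PROOFS =====

-- reference recursion both ports are reduced to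
def pvSpecFill : List String → List String → List String × Nat
  | [], _ => ([], 0)
  | c :: cs, ds =>
    if c == "??" then
      let r := pvSpecFill cs ds.tail
      (ds.headD "" :: r.1, r.2 + 1)
    else
      let r := pvSpecFill cs ds
      (c :: r.1, r.2)

lemma pvGetD_eq_headD_drop (ds : List String) (n : Nat) :
    PySem.List.pyGetD ds (n : Int) "" = (ds.drop n).headD "" := by
  simp [PySem.List.pyGetD_natCast, List.getD, List.head?_drop]


lemma pvGoA_eq_spec (cards : List String) : ∀ (ds : List String) (n : Nat),
    pvFillGoA cards ds n =
      ((pvSpecFill cards (ds.drop n)).1, n + (pvSpecFill cards (ds.drop n)).2) := by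
  induction cards with
  | nil => intro ds n; simp [pvFillGoA, pvSpecFill]
  | cons c cs ih =>
    intro ds n
    by_cases hc : c == "??"
    · simp only [pvFillGoA, pvSpecFill, hc, if_true, ih ds (n + 1)]
      rw [pvGetD_eq_headD_drop, ← List.tail_drop]
      exact Prod.ext rfl (by dsimp; omega)
    · simp [pvFillGoA, pvSpecFill, hc, ih ds n]

-- B-side reference: sequential positional assignment
def pvAssign : List Int → List String → List String → List String
  | [], _, f => f
  | p :: ps, ds, f => pvAssign ps ds.tail (PySem.List.pySetD f p (ds.headD ""))

lemma pvFold_eq_assign (ps : List Int) (ds : List String) :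
    ∀ (m s : Nat) (f : List String), s + m = ps.length →
    (PySem.List.pyRange (s : Int) (ps.length : Int) 1).foldl
        (fun f j => PySem.List.pySetD f (PySem.List.pyGetD ps j 0) (PySem.List.pyGetD ds j ""))
        f
      = pvAssign (ps.drop s) (ds.drop s) f := by
  intro m
  induction m with
  | zero =>
    intro s f hs
    rw [PySem.List.pyRange_one_eq_nil (by omega),
        List.drop_of_length_le (by omega : ps.length ≤ s)]
    simp [pvAssign]
  | succ m ih =>
    intro s f hs
    have hslt : s < ps.length := by omega
    rw [PySem.List.pyRange_one_cons (by exact_mod_cast hslt)]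
    have : ((s : Int) + 1) = ((s + 1 : Nat) : Int) := by push_cast; ring
    rw [List.foldl_cons, this, ih (s + 1) _ (by omega)]
    rw [List.drop_eq_getElem_cons hslt]
    simp only [pvAssign]
    congr 1
    · rw [← List.tail_drop]
    · congr 1
      · simp [PySem.List.pyGetD_natCast, List.getD, List.getElem?_eq_getElem hslt]
      · rw [pvGetD_eq_headD_drop]

lemma pvEnum_shift (xs : List String) : ∀ (s : Int),
    PySem.List.enumerate xs (s + 1) = (PySem.List.enumerate xs s).map (fun p => (p.1 + 1, p.2)) := by
  induction xs with
  | nil => intro s; simp [PySem.List.enumerate_nil]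
  | cons x xs ih => intro s; simp [PySem.List.enumerate_cons, ih (s + 1)]

-- the position list of B, with a general start
def pvPos (s : Int) (cards : List String) : List Int :=
  ((PySem.List.enumerate cards s).filter (fun p => p.2 == "??")).map (fun p => p.1)

lemma pvPos_cons (s : Int) (c : String) (cs : List String) :
    pvPos s (c :: cs) =
      (if c == "??" then [s] else []) ++ (pvPos s cs).map (fun p => p + 1) := by
  by_cases hc : c == "??" <;>
    simp [pvPos, PySem.List.enumerate_cons, hc, pvEnum_shift, List.filter_map,
          List.map_map, Function.comp_def]

lemma pvPos_nonneg (cards : List String) : ∀ (s : Int), ∀ p ∈ pvPos s cards, s ≤ p := by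
  induction cards with
  | nil => intro s p hp; simp [pvPos, PySem.List.enumerate_nil] at hp
  | cons c cs ih =>
    intro s p hp
    rw [pvPos_cons] at hp
    rcases List.mem_append.1 hp with h | h
    · by_cases hc : c == "??" <;> simp [hc] at h; omega
    · obtain ⟨q, hq, rfl⟩ := List.mem_map.1 h
      have := ih s q hq; omega

lemma pvAssign_map_succ (ps : List Int) :
    ∀ (ds : List String) (x : String) (f : List String), (∀ p ∈ ps, 0 ≤ p) →
    pvAssign (ps.map (fun p => p + 1)) ds (x :: f) = x :: pvAssign ps ds f := by
  induction ps with
  | nil => intro ds x f _; simp [pvAssign]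
  | cons p ps ih =>
    intro ds x f hnn
    have hp : 0 ≤ p := hnn p (List.mem_cons_self ..)
    simp only [List.map_cons, pvAssign]
    rw [PySem.List.pySetD_of_nonneg _ _ (by omega : (0:Int) ≤ p + 1), PySem.List.pySetD_of_nonneg _ _ hp]
    have ht : (p + 1).toNat = p.toNat + 1 := by omega
    rw [ht, List.set_cons_succ]
    exact ih ds.tail x _ (fun q hq => hnn q (List.mem_cons_of_mem _ hq))

lemma pvAssign_eq_spec (cards : List String) : ∀ (ds : List String),
    pvAssign (pvPos 0 cards) ds cards = (pvSpecFill cards ds).1 := by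
  induction cards with
  | nil => intro ds; simp [pvPos, PySem.List.enumerate_nil, pvAssign, pvSpecFill]
  | cons c cs ih =>
    intro ds
    have hnn : ∀ p ∈ pvPos 0 cs, 0 ≤ p := pvPos_nonneg cs 0
    rw [pvPos_cons]
    by_cases hc : c == "??"
    · rw [if_pos hc]
      simp only [List.singleton_append, pvAssign]
      rw [PySem.List.pySetD_of_nonneg _ _ (le_refl (0:Int))]
      simp only [Int.toNat_zero, List.set_cons_zero]
      rw [pvAssign_map_succ _ _ _ _ hnn, ih ds.tail]
      simp [pvSpecFill, hc]
    · rw [if_neg hc]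
      simp only [List.nil_append]
      rw [pvAssign_map_succ _ _ _ _ hnn, ih ds]
      simp [pvSpecFill, hc]

lemma pvSpec_snd_const (cards : List String) : ∀ (ds ds' : List String),
    (pvSpecFill cards ds).2 = (pvSpecFill cards ds').2 := by
  induction cards with
  | nil => intro ds ds'; simp [pvSpecFill]
  | cons c cs ih =>
    intro ds ds'
    by_cases hc : c == "??" <;> simp [pvSpecFill, hc, ih ds.tail ds'.tail, ih ds ds']

lemma pvPos_length (cards : List String) : ∀ (s : Int) (ds : List String),
    (pvPos s cards).length = (pvSpecFill cards ds).2 := by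
  induction cards with
  | nil => intro s ds; simp [pvPos, PySem.List.enumerate_nil, pvSpecFill]
  | cons c cs ih =>
    intro s ds
    rw [pvPos_cons]
    by_cases hc : c == "??" <;>
      simp [hc, pvSpecFill, ih s ds.tail, pvSpec_snd_const cs ds.tail ds]

-- ===== VERDICT (by name: the statement is the Claim_ definition above) =====
theorem fill_unknowns_py_spec : Claim_equal_fill_unknowns_py := by
  intro cards draws _ _
  unfold Spec_fill_unknowns_py fill_unknowns_py fill_unknowns_py_alt
  rw [pvGoA_eq_spec cards draws 0]
  have hfold := pvFold_eq_assign (pvPos 0 cards) draws (pvPos 0 cards).length 0 cards (by omega)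
  simp only [Nat.cast_zero] at hfold
  show ((pvSpecFill cards (draws.drop 0)).1, ((0 + (pvSpecFill cards (draws.drop 0)).2 : Nat) : Int))
      = _
  simp only [List.drop_zero, Nat.zero_add]
  refine Prod.ext ?_ ?_
  · show (pvSpecFill cards draws).1 = _
    dsimp only
    rw [show ((PySem.List.enumerate cards 0).filter (fun p => p.2 == "??")).map (fun p => p.1)
          = pvPos 0 cards from rfl, hfold]
    simp [pvAssign_eq_spec cards draws]
  · show ((pvSpecFill cards draws).2 : Int) = _
    dsimp only
    rw [show ((PySem.List.enumerate cards 0).filter (fun p => p.2 == "??")).map (fun p => p.1)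
          = pvPos 0 cards from rfl, pvPos_length cards 0 draws]
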